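-- pv_equiv track=rewrite | github.com/Dman603/Examples | PE54.py | flush
-- ===== SOURCE A (Python) =====
-- def flush(p1,p2):
--     suits = ['D','C','H','S']
--     winner = 0
--     for suit in suits:
--         if [c[len(c)-1] for c in p1] == [suit for i in range(5)]:
--             winner += 1
--     for suit in suits:
--         if [c[len(c)-1] for c in p2] == [suit for i in range(5)]:
--             winner += -1
--     return winner
-- ===== SOURCE B (Python) =====
-- def flush(p1, p2):
--     def is_flush(hand):
--         lasts = [c[len(c)-1] for c in hand]
--         return len(lasts) == 5 and len(set(lasts)) == 1 and lasts[0] in 'DCHS'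
--     return (1 if is_flush(p1) else 0) - (1 if is_flush(p2) else 0)
-- ===== Notes on version B (the rewrite author's own statement) =====
-- stated objective: simpler
-- what changed: Replaces the two 4-iteration suit loops comparing against [suit]*5 with a single is_flush predicate (length 5, one distinct last character, and it is a valid suit) applied once per hand; the result is the difference of the two flush indicators.
import Mathlib
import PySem

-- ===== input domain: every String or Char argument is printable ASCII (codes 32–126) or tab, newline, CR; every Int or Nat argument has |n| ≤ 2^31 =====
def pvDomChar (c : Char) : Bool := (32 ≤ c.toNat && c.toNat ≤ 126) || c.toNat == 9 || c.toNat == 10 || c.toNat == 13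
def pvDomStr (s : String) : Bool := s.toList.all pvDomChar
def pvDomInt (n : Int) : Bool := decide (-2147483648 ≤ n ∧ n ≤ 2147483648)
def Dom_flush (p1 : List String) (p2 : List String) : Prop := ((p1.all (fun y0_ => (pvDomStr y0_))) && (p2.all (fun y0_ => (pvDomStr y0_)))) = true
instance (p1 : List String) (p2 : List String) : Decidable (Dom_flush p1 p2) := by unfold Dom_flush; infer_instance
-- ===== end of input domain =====

-- B is simpler: one flush predicate per hand instead of two 4-suit loops; same values wherever A returns.

-- shared helper: [c[len(c)-1] for c in hand]  (none = IndexError on the empty string)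
def lastCards (hand : List String) : List (Option Char) :=
  hand.map (fun c => PySem.Str.pyGet? c (PySem.Str.len c - 1))

-- ===== PORT A =====
def flush (p1 : List String) (p2 : List String) : Int :=
  let suits : List Char := ['D', 'C', 'H', 'S']
  let winner : Int := 0
  let winner := suits.foldl (fun w suit =>
      if lastCards p1 = (PySem.List.pyRange 0 5 1).map (fun _ => some suit) then w + 1 else w) winner
  let winner := suits.foldl (fun w suit =>
      if lastCards p2 = (PySem.List.pyRange 0 5 1).map (fun _ => some suit) then w + (-1) else w) winner
  winner

-- ===== PORT B =====
-- len(lasts)==5 and len(set(lasts))==1 and lasts[0] in 'DCHS'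
def flushCheck (lasts : List (Option Char)) : Bool :=
  decide (lasts.length = 5) && decide (PySem.Set.len (PySem.Set.ofList lasts) = 1)
    && (PySem.List.pyGet? lasts 0).elim false
        (fun ch => [some 'D', some 'C', some 'H', some 'S'].contains ch)

def isFlushAlt (hand : List String) : Bool := flushCheck (lastCards hand)

def flush_alt (p1 : List String) (p2 : List String) : Int :=
  (if isFlushAlt p1 then 1 else 0) - (if isFlushAlt p2 then 1 else 0)

-- ===== PRECONDITION & SPEC =====
-- Pre_ excludes exactly the inputs containing an empty-string card, on which Python A raises IndexError.
def Pre_flush (p1 : List String) (p2 : List String) : Prop := "" ∉ p1 ∧ "" ∉ p2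
instance (p1 : List String) (p2 : List String) : Decidable (Pre_flush p1 p2) := by unfold Pre_flush; infer_instance
def pvWitness_flush : List String × List String :=
  (["2D", "3D", "KD", "7D", "9D"], ["2C", "3H", "4S", "5D", "6C"])

def Spec_flush (p1 : List String) (p2 : List String) (out : Int) : Prop := out = flush_alt p1 p2
instance (p1 : List String) (p2 : List String) (out : Int) : Decidable (Spec_flush p1 p2 out) := by unfold Spec_flush; infer_instance

-- ===== CLAIM (what is proved, stated in full; the proofs are below) =====
def Claim_equal_flush : Prop := ∀ (p1 : List String) (p2 : List String), Dom_flush p1 p2 → Pre_flush p1 p2 → Spec_flush p1 p2 (flush p1 p2)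

-- ===== LEMMAS AND PROOFS =====

-- replicate-5 list of a given suit, as A's comparison target evaluates
def rep5 (s : Char) : List (Option Char) := List.replicate 5 (some s)

theorem pyRange_map_eq_rep5 (s : Char) :
    (PySem.List.pyRange 0 5 1).map (fun _ => some s) = rep5 s := by
  rw [show PySem.List.pyRange 0 5 1 = [0, 1, 2, 3, 4] from by decide]; rfl

-- B's predicate holds iff the last-card list is one of the four suit patterns
theorem flushCheck_iff (l : List (Option Char)) :
    flushCheck l = true ↔
      l = rep5 'D' ∨ l = rep5 'C' ∨ l = rep5 'H' ∨ l = rep5 'S' := by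
  constructor
  · intro h
    simp only [flushCheck, Bool.and_eq_true, decide_eq_true_eq] at h
    obtain ⟨⟨hlen, hset⟩, hmem⟩ := h
    -- all elements of l are equal to the unique element of its set
    obtain ⟨a, ha⟩ : ∃ a, PySem.Set.ofList l = [a] := by
      rcases h' : PySem.Set.ofList l with _ | ⟨a, _ | _⟩
      · simp [PySem.Set.len, h'] at hset
      · exact ⟨a, rfl⟩
      · exfalso; simp [PySem.Set.len, h'] at hset; omega
    have hall : ∀ x ∈ l, x = a := by
      intro x hx
      have : x ∈ PySem.Set.ofList l := (PySem.Set.mem_ofList l x).mpr hx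
      simpa [ha] using this
    have hrep : l = List.replicate 5 a :=
      List.eq_replicate_iff.mpr ⟨hlen, hall⟩
    rw [hrep, PySem.List.pyGet?_zero] at hmem
    simp only [List.getElem?_replicate, Option.elim] at hmem
    have hmem' : a = some 'D' ∨ a = some 'C' ∨ a = some 'H' ∨ a = some 'S' := by
      simpa using hmem
    rcases hmem' with h | h | h | h <;> subst h <;> simp [rep5, hrep]
  · intro h
    rcases h with h | h | h | h <;> subst h <;> decide

-- evaluating A's 4-suit foldl for one hand
theorem foldl_suits (l : List (Option Char)) (w d : Int) :
    (['D', 'C', 'H', 'S'] : List Char).foldl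
        (fun w suit => if l = (PySem.List.pyRange 0 5 1).map (fun _ => some suit) then w + d else w) w
      = w + (if (l = rep5 'D' ∨ l = rep5 'C' ∨ l = rep5 'H' ∨ l = rep5 'S') then d else 0) := by
  simp only [List.foldl, pyRange_map_eq_rep5]
  by_cases hD : l = rep5 'D' <;> by_cases hC : l = rep5 'C' <;>
    by_cases hH : l = rep5 'H' <;> by_cases hS : l = rep5 'S' <;>
    simp_all [rep5]

theorem flush_eq (p1 p2 : List String) : flush p1 p2 = flush_alt p1 p2 := by
  unfold flush flush_alt isFlushAlt
  simp only [foldl_suits]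
  by_cases h1 : flushCheck (lastCards p1) = true <;> by_cases h2 : flushCheck (lastCards p2) = true
  · rw [if_pos ((flushCheck_iff (lastCards p1)).mp h1), if_pos ((flushCheck_iff (lastCards p2)).mp h2), if_pos h1, if_pos h2]; omega
  · rw [if_pos ((flushCheck_iff (lastCards p1)).mp h1), if_neg (fun hc => h2 ((flushCheck_iff (lastCards p2)).mpr hc)),
        if_pos h1, if_neg h2]; omega
  · rw [if_neg (fun hc => h1 ((flushCheck_iff (lastCards p1)).mpr hc)), if_pos ((flushCheck_iff (lastCards p2)).mp h2),
        if_neg h1, if_pos h2]; omega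
  · rw [if_neg (fun hc => h1 ((flushCheck_iff (lastCards p1)).mpr hc)),
        if_neg (fun hc => h2 ((flushCheck_iff (lastCards p2)).mpr hc)), if_neg h1, if_neg h2]; omega

-- ===== VERDICT (by name: the statement is the Claim_ definition above) =====
theorem flush_spec : Claim_equal_flush := by
  intro p1 p2 _ _
  unfold Spec_flush
  exact flush_eq p1 p2
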